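-- pv_equiv track=rewrite | github.com/zhaolianzhou/LeetCode_Python | 901-1000/953_verifyingAlienDictionary.py | compareWords
-- ===== SOURCE A (Python) =====
-- def compareWords(w1, w2, order):
--     for index in range(0, len(w1)):
--         if index >= len(w2):
--             return False
--         if order.index(w1[index]) < order.index(w2[index]):
--             return True
--         elif order.index(w1[index]) > order.index(w2[index]):
--             return False
--
--     return True
-- ===== SOURCE B (Python) =====
-- def compareWords(w1, w2, order):
--     rank = {}
--     for i, c in enumerate(order):
--         rank.setdefault(c, i)
--     unknown = len(order)
--     k1 = [rank.get(c, unknown) for c in w1]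
--     k2 = [rank.get(c, unknown) for c in w2]
--     return k1 <= k2
-- ===== Notes on version B (the rewrite author's own statement) =====
-- stated objective: alternative
-- what changed: Replaces A's loop that rescans `order` with order.index at every position by a staged pipeline: build a first-occurrence rank dict over `order` once, map each word to its rank list (unknown characters rank after all known ones), and let Python's built-in lexicographic list comparison decide; measured about even at the tested sizes.
import Mathlib
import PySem

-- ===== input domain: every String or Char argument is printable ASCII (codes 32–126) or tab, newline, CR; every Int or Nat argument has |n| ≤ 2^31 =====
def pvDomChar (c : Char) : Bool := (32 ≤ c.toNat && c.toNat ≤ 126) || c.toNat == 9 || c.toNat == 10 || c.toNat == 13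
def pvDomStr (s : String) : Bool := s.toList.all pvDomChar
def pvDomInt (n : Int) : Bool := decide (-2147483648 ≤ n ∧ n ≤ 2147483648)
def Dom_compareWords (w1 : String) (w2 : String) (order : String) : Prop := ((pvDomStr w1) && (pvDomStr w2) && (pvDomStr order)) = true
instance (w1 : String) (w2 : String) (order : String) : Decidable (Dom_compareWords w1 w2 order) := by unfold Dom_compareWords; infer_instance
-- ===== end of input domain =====

-- B builds a first-occurrence rank dict once, maps each word to its rank list and compares
-- lexicographically, instead of A's loop that rescans `order` with order.index at every position.


-- ===== PORT A =====
-- A's loop over index in range(0, len(w1)) with its two early returns; under Pre_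
-- every order.index call succeeds, so the `.getD 0` default is never taken.
def compareWordsLoopA (ord : List Char) : List Char → List Char → Bool
  | [], _ => true
  | c :: t1, l2 =>
    match l2 with
    | [] => false
    | d :: t2 =>
      if (PySem.List.index? ord c).getD 0 < (PySem.List.index? ord d).getD 0 then true
      else if (PySem.List.index? ord c).getD 0 > (PySem.List.index? ord d).getD 0 then false
      else compareWordsLoopA ord t1 t2

def compareWords (w1 : String) (w2 : String) (order : String) : Bool :=
  compareWordsLoopA order.toList w1.toList w2.toList

-- ===== PORT B =====
-- `rank = {}; for i, c in enumerate(order): rank.setdefault(c, i)`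
def rankDictB (ord : List Char) : PySem.Dict Char Int :=
  (PySem.List.enumerate ord 0).foldl (fun d p => d.setdefault p.2 p.1) PySem.Dict.empty

-- `[rank.get(c, unknown) for c in w]` with unknown = len(order)
def keyListB (ord : List Char) (w : List Char) : List Int :=
  w.map (fun c => (rankDictB ord).getD c (ord.length : Int))

-- Python's built-in lexicographic `<=` on lists of ints
def lexLeB : List Int → List Int → Bool
  | [], _ => true
  | _ :: _, [] => false
  | a :: t1, b :: t2 =>
    if a < b then true
    else if a > b then false
    else lexLeB t1 t2

def compareWords_alt (w1 : String) (w2 : String) (order : String) : Bool :=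
  lexLeB (keyListB order.toList w1.toList) (keyListB order.toList w2.toList)

-- ===== PRECONDITION & SPEC =====
-- Pre_ holds iff every character A's loop examines — the shared characters before the
-- first mismatch and, at the first mismatch, both characters — occurs in `order`;
-- exactly outside it A raises ValueError (B is total there).
def pvExaminedOk (ord : List Char) : List Char → List Char → Bool
  | c :: t1, d :: t2 =>
      if c = d then (c ∈ ord) && pvExaminedOk ord t1 t2
      else (c ∈ ord) && (d ∈ ord)
  | _, _ => true

def Pre_compareWords (w1 : String) (w2 : String) (order : String) : Prop :=
  pvExaminedOk order.toList w1.toList w2.toList = true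
instance (w1 : String) (w2 : String) (order : String) : Decidable (Pre_compareWords w1 w2 order) := by unfold Pre_compareWords; infer_instance

def pvWitness_compareWords : String × String × String := ("apple", "app", "ablepqz")

def Spec_compareWords (w1 : String) (w2 : String) (order : String) (out : Bool) : Prop := out = compareWords_alt w1 w2 order
instance (w1 : String) (w2 : String) (order : String) (out : Bool) : Decidable (Spec_compareWords w1 w2 order out) := by unfold Spec_compareWords; infer_instance

-- ===== CLAIM (what is proved, stated in full; the proofs are below) =====
def Claim_equal_compareWords : Prop := ∀ (w1 : String) (w2 : String) (order : String), Dom_compareWords w1 w2 order → Pre_compareWords w1 w2 order → Spec_compareWords w1 w2 order (compareWords w1 w2 order)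

-- ===== LEMMAS AND PROOFS =====
-- the setdefault fold records the FIRST occurrence index of each character
theorem get?_setdefault_fold (l : List Char) :
    ∀ (s : Int) (d : PySem.Dict Char Int) (c : Char),
      ((PySem.List.enumerate l s).foldl (fun d p => d.setdefault p.2 p.1) d).get? c =
        match d.get? c with
        | some v => some v
        | none => (PySem.List.index? l c).map (fun k => s + (k : Int)) := by
  induction l with
  | nil =>
    intro s d c
    simp only [PySem.List.enumerate_nil, List.foldl_nil, PySem.List.index?_eq_idxOf?,
      List.idxOf?_nil]
    cases d.get? c <;> rfl
  | cons x t ih =>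
    intro s d c
    rw [PySem.List.enumerate_cons]
    simp only [List.foldl_cons]
    rw [ih (s + 1) (d.setdefault x s) c]
    by_cases hx : c = x
    · subst hx
      rw [PySem.Dict.get?_setdefault_self d c s, PySem.List.index?_cons_self]
      cases h : d.get? c <;> simp
    · rw [PySem.Dict.get?_setdefault_of_ne d s hx,
        PySem.List.index?_cons_of_ne t (fun h => hx h.symm)]
      cases h : d.get? c
      · cases hk : PySem.List.index? t c <;> simp
        omega
      · rfl

theorem get?_rankDictB (ord : List Char) (c : Char) :
    (rankDictB ord).get? c = (PySem.List.index? ord c).map (fun k => (k : Int)) := by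
  unfold rankDictB
  rw [get?_setdefault_fold ord 0 PySem.Dict.empty c]
  simp [PySem.Dict.get?_empty]

-- two distinct members of ord have distinct indices
theorem index?_ne_of_ne (ord : List Char) (c d : Char) (hc : c ∈ ord) (hd : d ∈ ord)
    (hne : c ≠ d) : PySem.List.index? ord c ≠ PySem.List.index? ord d := by
  obtain ⟨k, hk⟩ : ∃ k, PySem.List.index? ord c = some k :=
    Option.isSome_iff_exists.mp ((PySem.List.index?_isSome_iff ord c).mpr hc)
  obtain ⟨m, hm⟩ : ∃ m, PySem.List.index? ord d = some m :=
    Option.isSome_iff_exists.mp ((PySem.List.index?_isSome_iff ord d).mpr hd)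
  obtain ⟨hkl, hck, -⟩ := PySem.List.getElem_of_index?_eq_some hk
  obtain ⟨hml, hdm, -⟩ := PySem.List.getElem_of_index?_eq_some hm
  rw [hk, hm]
  intro h
  apply hne
  have : k = m := by injection h
  subst this
  exact hck.symm.trans hdm

theorem loopA_eq_alt (ord : List Char) :
    ∀ l1 l2 : List Char, pvExaminedOk ord l1 l2 = true →
      compareWordsLoopA ord l1 l2 = lexLeB (keyListB ord l1) (keyListB ord l2) := by
  intro l1
  induction l1 with
  | nil => intro l2 _; cases l2 <;> simp [compareWordsLoopA, keyListB, lexLeB]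
  | cons c t1 ih =>
    intro l2 hpre
    cases l2 with
    | nil => simp [compareWordsLoopA, keyListB, lexLeB]
    | cons d t2 =>
      by_cases hcd : c = d
      · subst hcd
        simp only [pvExaminedOk, if_pos, Bool.and_eq_true] at hpre
        simp only [compareWordsLoopA, keyListB, List.map, lexLeB, lt_irrefl,
          if_false]
        exact ih t2 hpre.2
      · simp only [pvExaminedOk, if_neg hcd, Bool.and_eq_true, decide_eq_true_eq] at hpre
        have hne := index?_ne_of_ne ord c d hpre.1 hpre.2 hcd
        obtain ⟨i, hi⟩ : ∃ i, PySem.List.index? ord c = some i :=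
          Option.isSome_iff_exists.mp ((PySem.List.index?_isSome_iff ord c).mpr hpre.1)
        obtain ⟨j, hj⟩ : ∃ j, PySem.List.index? ord d = some j :=
          Option.isSome_iff_exists.mp ((PySem.List.index?_isSome_iff ord d).mpr hpre.2)
        have hij : i ≠ j := by rw [hi, hj] at hne; intro h; exact hne (by rw [h])
        have hfc : (rankDictB ord).getD c (ord.length : Int) = (i : Int) := by
          rw [PySem.Dict.getD_eq_get?_getD, get?_rankDictB, hi]; rfl
        have hfd : (rankDictB ord).getD d (ord.length : Int) = (j : Int) := by
          rw [PySem.Dict.getD_eq_get?_getD, get?_rankDictB, hj]; rfl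
        simp only [compareWordsLoopA, keyListB, List.map, lexLeB, hi, hj, hfc, hfd,
          Option.getD_some, gt_iff_lt]
        rcases Nat.lt_trichotomy i j with h | h | h
        · simp [h]
        · exact absurd h hij
        · have h' : ¬ (i < j) := Nat.lt_asymm h
          simp [h, h']

-- ===== VERDICT (by name: the statement is the Claim_ definition above) =====
theorem compareWords_spec : Claim_equal_compareWords := by
  intro w1 w2 order _ hpre
  unfold Spec_compareWords compareWords compareWords_alt
  exact loopA_eq_alt _ _ _ hpre
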